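-- pv_equiv track=rewrite | github.com/Bolozano/Acq | to_py.py | delete_paranthese
-- ===== SOURCE A (Python) =====
-- def delete_paranthese(text):
--     i=0
--     k=0
--     while len(text)>i:
--       if text[i] != '(':
--         if text[i]==')':
--           text=text[:i]+text[(i+1):]
--           continue
--         i=i+1
--         continue
--       else:
--         k=i
--         for j in range(i,len(text)):
--           if text[j]==')':
--             k=j
--             break
--         text=text[:i]+text[(k+1):]
--     return text
-- ===== SOURCE B (Python) =====
-- def delete_paranthese(text):
--     out = []
--     skip = False
--     closes = sum(1 for c in text if c == ')')
--     for c in text: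
--         if c == ')':
--             closes -= 1
--             skip = False
--         elif skip:
--             pass
--         elif c == '(':
--             skip = closes > 0
--         else:
--             out.append(c)
--     return ''.join(out)
-- ===== Notes on version B (the rewrite author's own statement) =====
-- stated objective: alternative
-- what changed: Replaced A's repeated in-place string splicing with rescans by a single left-to-right scan using a skip flag plus a precomputed count of remaining closing parentheses, building the output list once and joining.
import Mathlib
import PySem

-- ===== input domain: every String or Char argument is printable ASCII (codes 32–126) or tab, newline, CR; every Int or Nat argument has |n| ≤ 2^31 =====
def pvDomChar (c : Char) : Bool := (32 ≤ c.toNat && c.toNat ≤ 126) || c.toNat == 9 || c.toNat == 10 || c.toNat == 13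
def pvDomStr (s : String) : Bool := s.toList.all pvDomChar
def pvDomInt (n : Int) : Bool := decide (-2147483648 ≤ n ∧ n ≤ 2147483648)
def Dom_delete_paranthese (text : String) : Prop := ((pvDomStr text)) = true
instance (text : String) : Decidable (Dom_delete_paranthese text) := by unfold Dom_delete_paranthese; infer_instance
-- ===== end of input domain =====

-- B replaces A's repeated string splicing with one left-to-right scan using a skip flag and
-- a precomputed count of remaining closing parentheses (objective: alternative).

-- ===== PORT A =====
-- the inner "for j in range(i, len(text)): if text[j]==')': k=j; break" loop (k starts at i)
def pvFindK (text : List Char) (j : Nat) (i : Nat) : Nat :=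
  if h : j < text.length then
    if text[j] = ')' then j else pvFindK text (j + 1) i
  else i
termination_by text.length - j

-- lower bound on pvFindK, needed for the termination of the outer while loop below
theorem pvFindK_ge (text : List Char) (j i : Nat) (hj : i ≤ j) : i ≤ pvFindK text j i := by
  fun_induction pvFindK text j i with
  | case1 j h heq => exact hj
  | case2 j h heq ih => exact ih (by omega)
  | case3 j h => exact le_rfl

-- the outer while loop of A; state = (current text, i)
def pvAuxA (text : List Char) (i : Nat) : List Char :=
  if h : i < text.length then
    if text[i] ≠ '(' then
      if hc : text[i] = ')' then
        pvAuxA (text.take i ++ text.drop (i + 1)) i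
      else
        pvAuxA text (i + 1)
    else
      let k := pvFindK text i i
      pvAuxA (text.take i ++ text.drop (k + 1)) i
  else text
termination_by text.length - i
decreasing_by
  · simp [List.length_append, List.length_take, List.length_drop]; omega
  · omega
  · have hk : i ≤ pvFindK text i i := pvFindK_ge text i i le_rfl
    simp [List.length_append, List.length_take, List.length_drop]
    omega

def delete_paranthese (text : String) : String :=
  String.ofList (pvAuxA text.toList 0)

-- ===== PORT B =====
def pvStepB (st : List Char × Bool × Int) (c : Char) : List Char × Bool × Int :=
  if c = ')' then (st.1, false, st.2.2 - 1)
  else if st.2.1 then st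
  else if c = '(' then (st.1, decide (0 < st.2.2), st.2.2)
  else (st.1 ++ [c], st.2.1, st.2.2)

def delete_paranthese_alt (text : String) : String :=
  let closes : Int := text.toList.foldl (fun n c => if c == ')' then n + 1 else n) 0
  String.ofList (text.toList.foldl pvStepB ([], false, closes)).1

-- ===== PRECONDITION & SPEC =====
def Spec_delete_paranthese (text : String) (out : String) : Prop := out = delete_paranthese_alt text
instance (text : String) (out : String) : Decidable (Spec_delete_paranthese text out) := by unfold Spec_delete_paranthese; infer_instance

-- ===== CLAIM (what is proved, stated in full; the proofs are below) =====
def Claim_equal_delete_paranthese : Prop := ∀ (text : String), Dom_delete_paranthese text → Spec_delete_paranthese text (delete_paranthese text)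

-- ===== LEMMAS AND PROOFS =====

-- the common specification: one left-to-right pass; pvGskip discards up to the next closer
mutual
def pvG : List Char → List Char
  | [] => []
  | c :: t =>
      if c = ')' then pvG t
      else if c = '(' then (if ')' ∈ t then pvGskip t else pvG t)
      else c :: pvG t
def pvGskip : List Char → List Char
  | [] => []
  | c :: t => if c = ')' then pvG t else pvGskip t
end

theorem pvG_close (t : List Char) : pvG (')' :: t) = pvG t := by simp [pvG]

theorem pvG_open_mem (t : List Char) (hm : ')' ∈ t) : pvG ('(' :: t) = pvGskip t := by
  simp [pvG, hm]

theorem pvG_open_nomem (t : List Char) (hm : ')' ∉ t) : pvG ('(' :: t) = pvG t := by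
  simp [pvG, hm]

theorem pvG_char (c : Char) (t : List Char) (h1 : ¬c = ')') (h2 : ¬c = '(') :
    pvG (c :: t) = c :: pvG t := by simp [pvG, h1, h2]

theorem pvGskip_eq (t : List Char) (h : ')' ∈ t) :
    pvGskip t = pvG (t.drop (t.findIdx (· = ')') + 1)) := by
  induction t with
  | nil => cases h
  | cons c t ih =>
    by_cases hc : c = ')'
    · subst hc; simp [pvGskip, List.findIdx_cons]
    · have h' : ')' ∈ t := by
        rcases List.mem_cons.mp h with h1 | h1
        · exact absurd h1.symm hc
        · exact h1
      simp [pvGskip, hc, List.findIdx_cons, ih h']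

theorem pvFindK_eq (text : List Char) (j i : Nat) :
    pvFindK text j i =
      if ')' ∈ text.drop j then j + (text.drop j).findIdx (· = ')') else i := by
  fun_induction pvFindK text j i with
  | case1 j h heq =>
    have hd : text.drop j = text[j] :: text.drop (j + 1) := List.drop_eq_getElem_cons h
    have hmem : ')' ∈ text.drop j := by rw [hd, heq]; exact List.mem_cons_self
    have hidx : (text.drop j).findIdx (· = ')') = 0 := by
      rw [hd, List.findIdx_cons]; simp [heq]
    rw [if_pos hmem, hidx]; omega
  | case2 j h heq ih =>
    have hd : text.drop j = text[j] :: text.drop (j + 1) := List.drop_eq_getElem_cons h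
    have hmem : (')' ∈ text.drop j) ↔ (')' ∈ text.drop (j + 1)) := by
      rw [hd, List.mem_cons]
      constructor
      · rintro (h1 | h1)
        · exact absurd h1.symm heq
        · exact h1
      · exact fun h1 => Or.inr h1
    have hidx : (text.drop j).findIdx (· = ')') = (text.drop (j + 1)).findIdx (· = ')') + 1 := by
      rw [hd, List.findIdx_cons]; simp [heq]
    rw [ih]
    by_cases hm : ')' ∈ text.drop (j + 1)
    · rw [if_pos hm, if_pos (hmem.mpr hm), hidx]; omega
    · rw [if_neg hm, if_neg (fun hx => hm (hmem.mp hx))]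
  | case3 j h =>
    have : text.drop j = [] := List.drop_eq_nil_of_le (by omega)
    simp [this]

theorem pvAuxA_eq (text : List Char) (i : Nat) :
    pvAuxA text i = text.take i ++ pvG (text.drop i) := by
  fun_induction pvAuxA text i with
  | case1 text i h hne hc ih =>
    -- text[i] = ')'
    have hd : text.drop i = text[i] :: text.drop (i + 1) := List.drop_eq_getElem_cons h
    rw [ih]
    have h1 : ((text.take i ++ text.drop (i + 1)).take i) = text.take i :=
      List.take_left' (by simp; omega)
    have h2 : ((text.take i ++ text.drop (i + 1)).drop i) = text.drop (i + 1) :=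
      List.drop_left' (by simp; omega)
    rw [h1, h2, hd, hc, pvG_close]
  | case2 text i h hne hc ih =>
    -- ordinary character
    have hd : text.drop i = text[i] :: text.drop (i + 1) := List.drop_eq_getElem_cons h
    have hne' : ¬text[i] = '(' := by simpa using hne
    rw [ih, hd, pvG_char _ _ hc hne', List.take_succ, List.getElem?_eq_getElem h]
    simp only [Option.toList_some, List.append_assoc, List.singleton_append]
  | case3 text i h hne k ih =>
    -- text[i] = '('
    have hpar : text[i] = '(' := by simpa using hne
    have hd : text.drop i = text[i] :: text.drop (i + 1) := List.drop_eq_getElem_cons h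
    rw [ih]
    have h1 : ((text.take i ++ text.drop (pvFindK text i i + 1)).take i) = text.take i :=
      List.take_left' (by simp; omega)
    have h2 : ((text.take i ++ text.drop (pvFindK text i i + 1)).drop i)
        = text.drop (pvFindK text i i + 1) :=
      List.drop_left' (by simp; omega)
    rw [h1, h2]
    by_cases hm : ')' ∈ text.drop (i + 1)
    · have hmem : ')' ∈ text.drop i := by rw [hd]; exact List.mem_cons_of_mem _ hm
      have hidx : (text.drop i).findIdx (· = ')') = (text.drop (i + 1)).findIdx (· = ')') + 1 := by
        rw [hd, List.findIdx_cons]; simp [hpar]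
      have hk : pvFindK text i i = i + ((text.drop (i + 1)).findIdx (· = ')') + 1) := by
        rw [pvFindK_eq, if_pos hmem, hidx]
      have hdrop : text.drop (i + ((text.drop (i + 1)).findIdx (· = ')') + 1) + 1)
          = (text.drop (i + 1)).drop ((text.drop (i + 1)).findIdx (· = ')') + 1) := by
        rw [List.drop_drop]; congr 1; omega
      rw [hk, hdrop, ← pvGskip_eq _ hm, hd, hpar, pvG_open_mem _ hm]
    · have hmem : ')' ∉ text.drop i := by
        rw [hd, hpar]
        intro hx
        rcases List.mem_cons.mp hx with h1 | h1
        · exact absurd h1.symm (by decide)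
        · exact hm h1
      have hk : pvFindK text i i = i := by rw [pvFindK_eq, if_neg hmem]
      rw [hk, hd, hpar, pvG_open_nomem _ hm]
  | case4 text i h =>
    have h1 : text.drop i = [] := List.drop_eq_nil_of_le (by omega)
    have h2 : text.take i = text := List.take_of_length_le (by omega)
    simp [h1, h2, pvG]

theorem pvFoldB (t : List Char) (out : List Char) (skip : Bool) :
    (t.foldl pvStepB (out, skip, (t.count ')' : Int))).1
      = out ++ (if skip then pvGskip t else pvG t) := by
  induction t generalizing out skip with
  | nil => cases skip <;> simp [pvG, pvGskip]
  | cons c t ih =>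
    by_cases hc : c = ')'
    · subst hc
      rw [List.foldl_cons,
        show pvStepB (out, skip, ((')' :: t).count ')' : Int)) ')'
            = (out, false, (t.count ')' : Int)) by
          simp [pvStepB, List.count_cons],
        ih]
      cases skip <;> simp [pvG, pvGskip]
    · have hcnt : ((c :: t).count ')' : Int) = (t.count ')' : Int) := by
        simp [List.count_cons, hc]
      rw [List.foldl_cons]
      cases skip with
      | true =>
        rw [show pvStepB (out, true, ((c :: t).count ')' : Int)) c
              = (out, true, (t.count ')' : Int)) by simp [pvStepB, hc, hcnt], ih]
        simp [pvGskip, hc]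
      | false =>
        by_cases hp : c = '('
        · subst hp
          have hiff : decide (0 < (t.count ')' : Int)) = decide (')' ∈ t) := by
            simp [Int.natCast_pos, List.count_pos_iff]
          rw [show pvStepB (out, false, (('(' :: t).count ')' : Int)) '('
                = (out, decide (')' ∈ t), (t.count ')' : Int)) by
              rw [← hiff, ← hcnt]; simp [pvStepB], ih]
          by_cases hm : ')' ∈ t <;> simp [pvG, hm, hc]
        · rw [show pvStepB (out, false, ((c :: t).count ')' : Int)) c
                = (out ++ [c], false, (t.count ')' : Int)) by simp [pvStepB, hc, hp, hcnt], ih]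
          simp [pvG, hc, hp]

-- ===== VERDICT (by name: the statement is the Claim_ definition above) =====
theorem delete_paranthese_spec : Claim_equal_delete_paranthese := by
  intro text _
  unfold Spec_delete_paranthese delete_paranthese delete_paranthese_alt
  dsimp only
  have hA := pvAuxA_eq text.toList 0
  simp only [List.take_zero, List.drop_zero, List.nil_append] at hA
  have hcl : (text.toList.foldl (fun n c => if c == ')' then n + 1 else n) (0 : Int))
      = (text.toList.count ')' : Int) := by
    simpa using PySem.List.foldl_beq_add_one (l := text.toList) (v := ')') (a := (0 : Int))
  rw [hA, hcl, pvFoldB]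
  simp
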